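-- pv_equiv track=rewrite | github.com/Liana2707/consumer-behavior-kolmogorov | utils.py | encode_row
-- ===== SOURCE A (Python) =====
-- def encode_row(row):
--     """ Кодирует строку в десятичное числовое представление. """
--     s =  ' '.join(map(str, row))
--     mapping = {str(-2 + i): i for i in range(10)}
--     decimal_value = 0
--     parts = s.split()
--     for i, part in enumerate(parts):
--         decimal_value += mapping[part] * (10**(len(parts) - i - 1))
--     return decimal_value
-- ===== SOURCE B (Python) =====
-- def encode_row(row):
--     """ Кодирует строку в десятичное числовое представление. """
--     # Horner accumulation over the mapped digits; no str round-trip, no powers.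
--     mapping = {-2 + i: i for i in range(10)}
--     decimal_value = 0
--     for x in row:
--         decimal_value = decimal_value * 10 + mapping[x]
--     return decimal_value
-- ===== Notes on version B (the rewrite author's own statement) =====
-- stated objective: simpler
-- what changed: B drops A's str-join/split round-trip and string-keyed mapping and instead accumulates the positional value by Horner's rule (value = value*10 + mapping[x]) with an int-keyed digit map, instead of re-deriving the digits from a joined string and recomputing 10**(n-i-1) per element.
import Mathlib
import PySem

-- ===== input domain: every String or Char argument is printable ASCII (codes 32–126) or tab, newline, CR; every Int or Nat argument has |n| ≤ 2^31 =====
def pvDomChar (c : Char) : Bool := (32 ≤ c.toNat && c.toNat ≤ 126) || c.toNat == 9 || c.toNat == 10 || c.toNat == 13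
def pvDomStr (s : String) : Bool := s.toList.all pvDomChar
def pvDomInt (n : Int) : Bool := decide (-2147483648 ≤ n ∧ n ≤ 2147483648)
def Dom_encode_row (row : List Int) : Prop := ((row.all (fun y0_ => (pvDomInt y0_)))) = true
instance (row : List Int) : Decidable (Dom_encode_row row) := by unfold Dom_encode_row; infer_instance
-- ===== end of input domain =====

-- B replaces A's str-join/split round-trip, string-keyed mapping dict and per-element
-- 10**(n-i-1) powers by a single Horner-rule pass (value = value*10 + (x+2)); simpler.


-- ===== PORT A =====
-- mapping = {str(-2 + i): i for i in range(10)}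
def pvMapping : PySem.Dict String Int :=
  (PySem.List.pyRange 0 10 1).foldl
    (fun d i => d.insert (PySem.Int.toStr (-2 + i)) i) (PySem.Dict.mk [])

-- the for-loop over enumerate(parts); the exponent len(parts)-i-1 is ≥ 0 for every
-- visited index i, so `.toNat` is exact here
def pvALoop (parts : List String) : Int :=
  (PySem.List.enumerate parts).foldl
    (fun dv p => dv + pvMapping.getD p.2 0 * 10 ^ (((parts.length : Int)) - p.1 - 1).toNat) 0

def encode_row (row : List Int) : Int :=
  pvALoop (PySem.Str.split₀ (PySem.Str.join " " (row.map PySem.Int.toStr)))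

-- ===== PORT B =====
-- mapping = {-2 + i: i for i in range(10)}
def pvMappingB : PySem.Dict Int Int :=
  (PySem.List.pyRange 0 10 1).foldl (fun d i => d.insert (-2 + i) i) (PySem.Dict.mk [])

def encode_row_alt (row : List Int) : Int :=
  row.foldl (fun v x => v * 10 + pvMappingB.getD x 0) 0

-- ===== PRECONDITION & SPEC =====
-- Pre_ excludes exactly the rows containing an element outside -2..7, on which A
-- raises KeyError (its mapping has keys str(-2)..str(7) only) and returns nothing.
def Pre_encode_row (row : List Int) : Prop := ∀ x ∈ row, -2 ≤ x ∧ x ≤ 7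
instance (row : List Int) : Decidable (Pre_encode_row row) := by unfold Pre_encode_row; infer_instance
def pvWitness_encode_row : List Int := [1, -2, 7]

def Spec_encode_row (row : List Int) (out : Int) : Prop := out = encode_row_alt row
instance (row : List Int) (out : Int) : Decidable (Spec_encode_row row out) := by unfold Spec_encode_row; infer_instance

-- ===== CLAIM (what is proved, stated in full; the proofs are below) =====
def Claim_equal_encode_row : Prop := ∀ (row : List Int), Dom_encode_row row → Pre_encode_row row → Spec_encode_row row (encode_row row)

-- ===== LEMMAS AND PROOFS =====

-- str(x) for -2 ≤ x ≤ 7 is a nonempty word without whitespace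
set_option maxRecDepth 8000 in
theorem pv_toChars_word (x : Int) (h1 : -2 ≤ x) (h2 : x ≤ 7) :
    PySem.Int.toChars x ≠ [] ∧ ∀ c ∈ PySem.Int.toChars x, PySem.Chars.isspace c = false := by
  have h : (PySem.Int.toChars x ≠ []) ∧ ((PySem.Int.toChars x).all (fun c => !PySem.Chars.isspace c) = true) := by
    interval_cases x <;> decide
  refine ⟨h.1, fun c hc => ?_⟩
  have := List.all_eq_true.mp h.2 c hc
  simpa using this

set_option maxRecDepth 8000 in
theorem pv_mappingB_getD (x : Int) (h1 : -2 ≤ x) (h2 : x ≤ 7) :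
    pvMappingB.getD x 0 = x + 2 := by
  interval_cases x <;> decide

set_option maxRecDepth 8000 in
theorem pv_mapping_getD (x : Int) (h1 : -2 ≤ x) (h2 : x ≤ 7) :
    pvMapping.getD (PySem.Int.toStr x) 0 = x + 2 := by
  interval_cases x <;> decide

theorem pv_go_word (w : List Char) (hw : ∀ c ∈ w, PySem.Chars.isspace c = false) :
    ∀ (rest cur : List Char) (acc : List (List Char)),
      PySem.Chars.split₀.go (w ++ rest) cur acc
        = PySem.Chars.split₀.go rest (w.reverse ++ cur) acc := by
  induction w with
  | nil => intro rest cur acc; simp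
  | cons c w ih =>
    intro rest cur acc
    have hc : PySem.Chars.isspace c = false := hw c (by simp)
    have h1 : PySem.Chars.split₀.go (c :: (w ++ rest)) cur acc
        = PySem.Chars.split₀.go (w ++ rest) (c :: cur) acc := by
      simp [PySem.Chars.split₀.go, hc]
    simp only [List.cons_append, h1, ih (fun c hcw => hw c (by simp [hcw])) rest (c :: cur) acc]
    simp

theorem pv_go_join (ws : List (List Char))
    (h : ∀ w ∈ ws, w ≠ [] ∧ ∀ c ∈ w, PySem.Chars.isspace c = false) :
    ∀ acc, PySem.Chars.split₀.go (PySem.Chars.join [' '] ws) [] acc = acc.reverse ++ ws := by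
  induction ws with
  | nil => intro acc; simp [PySem.Chars.join_nil, PySem.Chars.split₀.go]
  | cons w tail ih =>
    intro acc
    obtain ⟨hne, hns⟩ := h w (by simp)
    cases tail with
    | nil =>
      rw [PySem.Chars.join_singleton]
      have h1 := pv_go_word w hns [] [] acc
      simp only [List.append_nil] at h1
      rw [h1]
      simp [PySem.Chars.split₀.go, hne]
    | cons q rest =>
      rw [PySem.Chars.join_cons_cons]
      have h1 := pv_go_word w hns (' ' :: PySem.Chars.join [' '] (q :: rest)) [] acc
      simp only [List.append_nil] at h1
      rw [List.append_assoc, List.singleton_append, h1]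
      have hs : PySem.Chars.isspace ' ' = true := by decide
      have h2 : PySem.Chars.split₀.go (' ' :: PySem.Chars.join [' '] (q :: rest)) w.reverse acc
          = PySem.Chars.split₀.go (PySem.Chars.join [' '] (q :: rest)) [] (w.reverse.reverse :: acc) := by
        simp [PySem.Chars.split₀.go, hs, hne]
      rw [h2, List.reverse_reverse,
        ih (fun u hu => h u (by simp [hu])) (w :: acc)]
      simp

theorem pv_split_join (ws : List (List Char))
    (h : ∀ w ∈ ws, w ≠ [] ∧ ∀ c ∈ w, PySem.Chars.isspace c = false) :
    PySem.Chars.split₀ (PySem.Chars.join [' '] ws) = ws := by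
  unfold PySem.Chars.split₀
  simpa using pv_go_join ws h []

theorem pv_parts_eq (row : List Int) (h : Pre_encode_row row) :
    PySem.Str.split₀ (PySem.Str.join " " (row.map PySem.Int.toStr)) = row.map PySem.Int.toStr := by
  unfold PySem.Str.split₀ PySem.Str.join
  have hwords : ∀ w ∈ row.map PySem.Int.toChars,
      w ≠ [] ∧ ∀ c ∈ w, PySem.Chars.isspace c = false := by
    intro w hw
    obtain ⟨x, hx, rfl⟩ := List.mem_map.mp hw
    exact pv_toChars_word x (h x hx).1 (h x hx).2
  have h1 : (row.map PySem.Int.toStr).map String.toList = row.map PySem.Int.toChars := by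
    simp [List.map_map, Function.comp, PySem.Int.toList_toStr]
  have h2 : (String.ofList (PySem.Chars.join " ".toList ((row.map PySem.Int.toStr).map String.toList))).toList
      = PySem.Chars.join [' '] (row.map PySem.Int.toChars) := by
    simp [h1]
  rw [h2, pv_split_join _ hwords]
  simp [List.map_map, Function.comp, PySem.Int.toStr]

-- positional value of the mapped digits
def pvVal : List Int → Int
  | [] => 0
  | x :: xs => (x + 2) * 10 ^ xs.length + pvVal xs

theorem pv_enumerate_cons (x : Int) (xs : List Int) (j : Int) :
    PySem.List.enumerate (x :: xs) j = (j, x) :: PySem.List.enumerate xs (j + 1) := by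
  simp [PySem.List.enumerate]

theorem pv_enumerate_map (l : List Int) (f : Int → String) :
    ∀ j, PySem.List.enumerate (l.map f) j
      = (PySem.List.enumerate l j).map (fun p => (p.1, f p.2)) := by
  induction l with
  | nil => intro j; simp
  | cons x xs ih => intro j; simp [ih]

theorem pv_mem_enumerate (l : List Int) :
    ∀ (j : Int) (p : Int × Int), p ∈ PySem.List.enumerate l j → p.2 ∈ l := by
  induction l with
  | nil => intro j p hp; simp at hp
  | cons x xs ih =>
    intro j p hp
    rw [pv_enumerate_cons] at hp
    rcases List.mem_cons.mp hp with h | h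
    · subst h; simp
    · exact List.mem_cons_of_mem _ (ih (j + 1) p h)

theorem pv_sumA (n : Int) (l : List Int) :
    ∀ (j acc : Int), n = j + l.length →
      (PySem.List.enumerate l j).foldl
        (fun dv p => dv + (p.2 + 2) * 10 ^ ((n - p.1 - 1).toNat)) acc
      = acc + pvVal l := by
  induction l with
  | nil => intro j acc _; simp [pvVal]
  | cons x xs ih =>
    intro j acc hn
    rw [pv_enumerate_cons]
    simp only [List.foldl_cons]
    rw [ih (j + 1) _ (by simp at hn ⊢; omega)]
    have he : (n - j - 1).toNat = xs.length := by
      simp at hn; omega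
    simp [pvVal, he]
    ring

theorem pv_horner (l : List Int) :
    ∀ acc : Int, l.foldl (fun v x => v * 10 + (x + 2)) acc = acc * 10 ^ l.length + pvVal l := by
  induction l with
  | nil => intro acc; simp [pvVal]
  | cons x xs ih =>
    intro acc
    simp only [List.foldl_cons, ih, pvVal, List.length_cons]
    ring

-- ===== VERDICT (by name: the statement is the Claim_ definition above) =====
theorem encode_row_spec : Claim_equal_encode_row := by
  intro row _ hpre
  unfold Spec_encode_row encode_row encode_row_alt pvALoop
  rw [pv_parts_eq row hpre, pv_enumerate_map row PySem.Int.toStr 0, List.foldl_map]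
  rw [PySem.List.foldl_congr_mem _ _
      (fun dv p => dv + (p.2 + 2) * 10 ^ ((((row.map PySem.Int.toStr).length : Int)) - p.1 - 1).toNat) 0
      (by
        intro acc p hp
        have hmem := pv_mem_enumerate row 0 p hp
        rw [pv_mapping_getD p.2 (hpre p.2 hmem).1 (hpre p.2 hmem).2])]
  rw [pv_sumA ((row.map PySem.Int.toStr).length : Int) row 0 0 (by simp)]
  rw [PySem.List.foldl_congr_mem row _ (fun v x => v * 10 + (x + 2)) 0
      (fun acc x hx => by rw [pv_mappingB_getD x (hpre x hx).1 (hpre x hx).2])]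
  rw [pv_horner row 0]
  simp
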